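-- pv_equiv track=rewrite | github.com/bakunobu/exercise | 1400_basic_tasks/chap_11/ex_11_124.py | count_min_els
-- ===== SOURCE A (Python) =====
-- def count_min_els(nums:list) -> int:
--     counter = 0
--     min_el = None
--     for num in nums:
--         if min_el is None:
--             counter += 1
--             min_el = num
--         elif num < min_el:
--             min_el = num
--             counter = 1
--         elif num == min_el:
--             counter += 1
--         else:
--             pass
--     return(counter)
-- ===== SOURCE B (Python) =====
-- def count_min_els(nums: list) -> int:
--     if not nums:
--         return 0
--     m = min(nums)
--     return nums.count(m)
-- ===== Notes on version B (the rewrite author's own statement) =====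
-- stated objective: simpler
-- what changed: Replaces A's single fused scan that tracks a running minimum and resets a counter with two plain library passes: min(nums) then nums.count(m), guarding the empty list.
import Mathlib
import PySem

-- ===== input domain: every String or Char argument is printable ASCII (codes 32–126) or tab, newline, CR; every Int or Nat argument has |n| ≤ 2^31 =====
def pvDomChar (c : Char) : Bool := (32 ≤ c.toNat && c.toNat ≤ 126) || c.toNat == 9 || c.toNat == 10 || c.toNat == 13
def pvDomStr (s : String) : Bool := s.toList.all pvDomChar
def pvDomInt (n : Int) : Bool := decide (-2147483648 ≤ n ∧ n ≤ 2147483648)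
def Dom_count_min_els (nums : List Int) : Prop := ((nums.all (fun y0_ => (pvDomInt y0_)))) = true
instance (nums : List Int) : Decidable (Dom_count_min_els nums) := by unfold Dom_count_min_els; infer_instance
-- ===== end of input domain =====

-- ===== PORT A =====
-- B replaces the fused min-tracking scan with min-then-count; no behaviour change.
def count_min_els (nums : List Int) : Int :=
  (nums.foldl (fun (s : Int × Option Int) num =>
    match s.2 with
    | none => (s.1 + 1, some num)
    | some m =>
      if num < m then (1, some num)
      else if num = m then (s.1 + 1, s.2)
      else s) (0, none)).1

-- ===== PORT B =====
def count_min_els_alt (nums : List Int) : Int :=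
  if nums = [] then 0
  else
    match PySem.List.min? nums (fun x => x) with
    | some m => (PySem.List.count nums m : Int)
    | none => 0

-- ===== PRECONDITION & SPEC =====
def Spec_count_min_els (nums : List Int) (out : Int) : Prop := out = count_min_els_alt nums
instance (nums : List Int) (out : Int) : Decidable (Spec_count_min_els nums out) := by unfold Spec_count_min_els; infer_instance

-- ===== CLAIM (what is proved, stated in full; the proofs are below) =====
def Claim_equal_count_min_els : Prop := ∀ (nums : List Int), Dom_count_min_els nums → Spec_count_min_els nums (count_min_els nums)

-- ===== LEMMAS AND PROOFS =====

-- ===== VERDICT (by name: the statement is the Claim_ definition above) =====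
def pvF : Int × Option Int → Int → Int × Option Int := fun s num =>
    match s.2 with
    | none => (s.1 + 1, some num)
    | some m =>
      if num < m then (1, some num)
      else if num = m then (s.1 + 1, s.2)
      else s

theorem pvFoldlMinLe (t : List Int) : ∀ x : Int, t.foldl min x ≤ x := by
  induction t with
  | nil => intro x; simp
  | cons y t ih =>
    intro x
    simp only [List.foldl_cons]
    exact le_trans (ih (min x y)) (min_le_left x y)

theorem pvLoop (l : List Int) : ∀ (c m : Int),
    l.foldl pvF (c, some m) =
      ((if l.foldl min m = m then c else 0) + (l.count (l.foldl min m) : Int),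
       some (l.foldl min m)) := by
  induction l with
  | nil => intro c m; simp
  | cons x t ih =>
    intro c m
    simp only [List.foldl_cons]
    by_cases hlt : x < m
    · have hstep : pvF (c, some m) x = (1, some x) := by simp [pvF, hlt]
      have hmin : min m x = x := by omega
      rw [hstep, ih 1 x]
      simp only [hmin]
      have hle : t.foldl min x ≤ x := pvFoldlMinLe t _
      by_cases he : t.foldl min x = x
      · have hne : x ≠ m := by omega
        simp [he, List.count_cons, hne]
        omega
      · have hnm : t.foldl min x ≠ m := by
          have : t.foldl min x < x := lt_of_le_of_ne hle he
          omega
        simp [List.count_cons, he, hnm, Ne.symm he]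
    · by_cases heq : x = m
      · subst heq
        have hstep : pvF (c, some x) x = (c + 1, some x) := by simp [pvF]
        have hmin : min x x = x := min_self x
        rw [hstep, ih (c+1) x]
        simp only [hmin]
        by_cases he : t.foldl min x = x
        · simp [he, List.count_cons]
          push_cast
          ring
        · simp [he, List.count_cons, Ne.symm he]
      · have hgt : m < x := by omega
        have hstep : pvF (c, some m) x = (c, some m) := by simp [pvF, hlt, heq]
        have hmin : min m x = m := by omega
        rw [hstep, ih c m]
        simp only [hmin]
        have hle : t.foldl min m ≤ m := pvFoldlMinLe t _
        have hnx : t.foldl min m ≠ x := by omega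
        simp [List.count_cons, hnx, Ne.symm hnx]

theorem count_min_els_spec : Claim_equal_count_min_els := by
  intro nums _
  unfold Spec_count_min_els
  cases nums with
  | nil => rfl
  | cons x t =>
    show (List.foldl pvF (0, none) (x :: t)).1 = _
    have h1 : List.foldl pvF (0, none) (x :: t) = List.foldl pvF (1, some x) t := rfl
    rw [h1, pvLoop t 1 x]
    simp only [count_min_els_alt]
    rw [PySem.List.min?_id_cons]
    simp only [List.cons_ne_self x t |>.symm, if_neg (by simp : ¬ (x :: t = []))]
    rw [PySem.List.count_eq]
    by_cases he : t.foldl min x = x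
    · simp [he, List.count_cons]
      push_cast; ring
    · simp [List.count_cons, he, Ne.symm he]
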